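-- pv_equiv track=rewrite | github.com/ImAadarsh/qb | update_arts_chapter.py | create_answer_key
-- ===== SOURCE A (Python) =====
-- def create_answer_key(answers, num_questions):
--     """Create the answer key section in LaTeX format."""
--     latex_answers = "\\answerkey\n"
--
--     for i in range(1, num_questions + 1):
--         if i in answers:
--             option, _ = answers[i]
--             if option == 'a':
--                 latex_option = 'a'
--             elif option == 'b':
--                 latex_option = 'b'
--             else:
--                 latex_option = 'c'
--             latex_answers += f"\\answer{{{latex_option}}} % Question {i}\n"
--
--     latex_answers += "\\endanswerkey\n"
--     return latex_answers
-- ===== SOURCE B (Python) =====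
-- def create_answer_key(answers, num_questions):
--     """Create the answer key section in LaTeX format."""
--     body = ""
--     for k, (opt, _) in sorted(answers.items(), key=lambda kv: kv[0]):
--         if 1 <= k <= num_questions:
--             body += f"\\answer{{{opt if opt in ('a', 'b') else 'c'}}} % Question {k}\n"
--     return "\\answerkey\n" + body + "\\endanswerkey\n"
-- ===== Notes on version B (the rewrite author's own statement) =====
-- stated objective: alternative
-- what changed: Instead of scanning every index 1..num_questions and probing dict membership, B sorts the dict's items by key once and walks only the present entries, filtering to the 1..num_questions range; Pre_ excludes association lists with duplicate keys, which cannot arise from a Python dict.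
import Mathlib
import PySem

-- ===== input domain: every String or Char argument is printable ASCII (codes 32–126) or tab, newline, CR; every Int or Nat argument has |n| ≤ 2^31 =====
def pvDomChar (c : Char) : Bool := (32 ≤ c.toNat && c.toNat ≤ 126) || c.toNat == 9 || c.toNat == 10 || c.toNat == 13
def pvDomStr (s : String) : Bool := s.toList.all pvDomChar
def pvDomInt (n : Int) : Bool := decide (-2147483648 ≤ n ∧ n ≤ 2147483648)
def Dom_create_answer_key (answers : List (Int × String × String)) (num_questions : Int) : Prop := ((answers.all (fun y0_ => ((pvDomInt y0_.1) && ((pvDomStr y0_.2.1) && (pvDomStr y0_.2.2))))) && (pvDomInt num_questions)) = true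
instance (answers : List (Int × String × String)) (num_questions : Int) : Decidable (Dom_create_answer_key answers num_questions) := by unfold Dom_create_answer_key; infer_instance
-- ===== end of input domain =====

-- B walks the dict's items sorted by key (filtered to 1..num_questions) instead of
-- scanning every index 1..num_questions and probing membership; return value only.

-- ===== PORT A =====
def create_answer_key (answers : List (Int × String × String)) (num_questions : Int) : String :=
  let latex_answers := "\\answerkey\n"
  let latex_answers :=
    (PySem.List.pyRange 1 (num_questions + 1)).foldl (fun acc i =>
      -- 'if i in answers: option, _ = answers[i]' — membership and lookup are the first match
      match answers.find? (fun p => p.1 == i) with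
      | some (_, option, _) =>
          let latex_option := if option = "a" then "a" else if option = "b" then "b" else "c"
          acc ++ "\\answer{" ++ latex_option ++ "} % Question " ++ PySem.Int.toStr i ++ "\n"
      | none => acc) latex_answers
  latex_answers ++ "\\endanswerkey\n"

-- ===== PORT B =====
def create_answer_key_alt (answers : List (Int × String × String)) (num_questions : Int) : String :=
  let body :=
    (PySem.List.sorted answers (fun kv => kv.1)).foldl (fun acc kv =>
      if 1 ≤ kv.1 ∧ kv.1 ≤ num_questions then
        acc ++ "\\answer{" ++ (if kv.2.1 = "a" ∨ kv.2.1 = "b" then kv.2.1 else "c")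
            ++ "} % Question " ++ PySem.Int.toStr kv.1 ++ "\n"
      else acc) ""
  "\\answerkey\n" ++ body ++ "\\endanswerkey\n"

-- ===== PRECONDITION & SPEC =====
-- Pre_ excludes association lists with duplicate keys: they cannot arise from the Python
-- dict the function receives, and the assoc-list representation is ambiguous on them.
def Pre_create_answer_key (answers : List (Int × String × String)) (num_questions : Int) : Prop :=
  (answers.map Prod.fst).Nodup
instance (answers : List (Int × String × String)) (num_questions : Int) : Decidable (Pre_create_answer_key answers num_questions) := by unfold Pre_create_answer_key; infer_instance

def pvWitness_create_answer_key : (List (Int × String × String)) × Int :=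
  ([(1, "a", "x"), (2, "c", "y")], 2)

def Spec_create_answer_key (answers : List (Int × String × String)) (num_questions : Int) (out : String) : Prop := out = create_answer_key_alt answers num_questions
instance (answers : List (Int × String × String)) (num_questions : Int) (out : String) : Decidable (Spec_create_answer_key answers num_questions out) := by unfold Spec_create_answer_key; infer_instance

-- ===== CLAIM (what is proved, stated in full; the proofs are below) =====
def Claim_equal_create_answer_key : Prop := ∀ (answers : List (Int × String × String)) (num_questions : Int), Dom_create_answer_key answers num_questions → Pre_create_answer_key answers num_questions → Spec_create_answer_key answers num_questions (create_answer_key answers num_questions)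

-- ===== LEMMAS AND PROOFS =====

-- the line each side emits for one entry
def pvLineA (kv : Int × String × String) : String :=
  "\\answer{" ++ (if kv.2.1 = "a" then "a" else if kv.2.1 = "b" then "b" else "c")
      ++ "} % Question " ++ PySem.Int.toStr kv.1 ++ "\n"

def pvLine (kv : Int × String × String) : String :=
  "\\answer{" ++ (if kv.2.1 = "a" ∨ kv.2.1 = "b" then kv.2.1 else "c")
      ++ "} % Question " ++ PySem.Int.toStr kv.1 ++ "\n"

-- concatenation of the lines of a list of entries
def pvCatA : List (Int × String × String) → String
  | [] => ""
  | p :: t => pvLineA p ++ pvCatA t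

def pvCat : List (Int × String × String) → String
  | [] => ""
  | p :: t => pvLine p ++ pvCat t

theorem pvLineA_eq (option : String) :
    (if option = "a" then "a" else if option = "b" then "b" else "c")
      = (if option = "a" ∨ option = "b" then option else "c") := by
  by_cases ha : option = "a" <;> by_cases hb : option = "b" <;> simp [ha, hb]

theorem pvCatA_eq (l : List (Int × String × String)) : pvCatA l = pvCat l := by
  induction l with
  | nil => rfl
  | cons p t ih => simp [pvCatA, pvCat, pvLineA, pvLine, pvLineA_eq p.2.1, ih]

-- A's loop, flattened
theorem pvFoldA (answers : List (Int × String × String))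
    (l : List Int) (acc : String) :
    (l.foldl (fun acc i =>
      match answers.find? (fun p => p.1 == i) with
      | some (_, option, _) =>
          acc ++ "\\answer{" ++ (if option = "a" then "a" else if option = "b" then "b" else "c")
              ++ "} % Question " ++ PySem.Int.toStr i ++ "\n"
      | none => acc) acc)
    = acc ++ pvCatA (l.filterMap (fun i => answers.find? (fun p => p.1 == i))) := by
  induction l generalizing acc with
  | nil => simp [pvCatA]
  | cons i t ih =>
    cases h : answers.find? (fun p => p.1 == i) with
    | none => simp only [List.foldl_cons, List.filterMap_cons, h]; exact ih acc
    | some p =>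
      obtain ⟨k, option, rest⟩ := p
      have hk : k = i := by
        have := List.find?_some h
        simpa using this
      subst hk
      simp only [List.foldl_cons, List.filterMap_cons, h]
      rw [ih]
      simp [pvCatA, pvLineA, String.append_assoc]

-- B's loop, flattened
theorem pvFoldB (num_questions : Int) (l : List (Int × String × String)) (acc : String) :
    (l.foldl (fun acc kv =>
      if 1 ≤ kv.1 ∧ kv.1 ≤ num_questions then
        acc ++ "\\answer{" ++ (if kv.2.1 = "a" ∨ kv.2.1 = "b" then kv.2.1 else "c")
            ++ "} % Question " ++ PySem.Int.toStr kv.1 ++ "\n"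
      else acc) acc)
    = acc ++ pvCat (l.filter (fun kv => decide (1 ≤ kv.1 ∧ kv.1 ≤ num_questions))) := by
  induction l generalizing acc with
  | nil => simp [pvCat]
  | cons kv t ih =>
    simp only [List.foldl_cons, List.filter_cons]
    by_cases h : 1 ≤ kv.1 ∧ kv.1 ≤ num_questions
    · have hd : decide (1 ≤ kv.1 ∧ kv.1 ≤ num_questions) = true := by simpa using h
      rw [if_pos h, hd, if_pos rfl, ih]
      simp [pvCat, pvLine, String.append_assoc]
    · have hd : decide (1 ≤ kv.1 ∧ kv.1 ≤ num_questions) = false := by simpa using h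
      rw [if_neg h, hd]
      simp only [Bool.false_eq_true, if_false]
      exact ih acc

-- disjoint-predicate filter split, up to permutation
theorem pvFilterOr {α : Type} (xs : List α) (p q : α → Bool)
    (h : ∀ x, p x = true → q x = false) :
    (xs.filter (fun x => p x || q x)).Perm (xs.filter p ++ xs.filter q) := by
  induction xs with
  | nil => simp
  | cons x t ih =>
    by_cases hp : p x = true
    · have hq := h x hp
      simpa [List.filter_cons, hp, hq] using ih.cons x
    · by_cases hq : q x = true
      · simp only [List.filter_cons, hp, hq, Bool.false_or]
        exact ((ih.cons x).trans List.perm_middle.symm)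
      · simpa [List.filter_cons, hp, hq] using ih

-- with nodup keys, filtering on one key is the first match
theorem pvFilterKey (answers : List (Int × String × String))
    (h : (answers.map Prod.fst).Nodup) (a : Int) :
    answers.filter (fun p => p.1 == a) = (answers.find? (fun p => p.1 == a)).toList := by
  induction answers with
  | nil => simp
  | cons x t ih =>
    simp only [List.map_cons, List.nodup_cons] at h
    by_cases hx : x.1 = a
    · have ht : t.filter (fun p => p.1 == a) = [] := by
        rw [List.filter_eq_nil_iff]
        intro p hp
        simp only [beq_iff_eq]
        intro hpa
        have hmem : p.1 ∈ t.map Prod.fst := List.mem_map_of_mem hp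
        exact h.1 (by rwa [hpa, ← hx] at hmem)
      simp [List.filter_cons, hx, ht]
    · simp [List.filter_cons, hx, ih h.2]

-- A's picked entries are a permutation of the in-range entries
theorem pvPermA (answers : List (Int × String × String))
    (h : (answers.map Prod.fst).Nodup) :
    ∀ (n : Nat) (a b : Int), (b - a).toNat = n →
    ((PySem.List.pyRange a b).filterMap (fun i => answers.find? (fun p => p.1 == i))).Perm
      (answers.filter (fun p => decide (a ≤ p.1 ∧ p.1 < b))) := by
  intro n
  induction n using Nat.strong_induction_on with
  | _ n ih =>
    intro a b hn
    by_cases hab : a < b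
    · rw [PySem.List.pyRange_one_cons hab, List.filterMap_cons]
      have hsplit : (answers.filter (fun p => decide (a ≤ p.1 ∧ p.1 < b))).Perm
          ((answers.filter (fun p => p.1 == a)) ++
           (answers.filter (fun p => decide (a + 1 ≤ p.1 ∧ p.1 < b)))) := by
        have := pvFilterOr answers (fun p => p.1 == a)
          (fun p => decide (a + 1 ≤ p.1 ∧ p.1 < b))
          (by intro x hx; simp only [beq_iff_eq] at hx; simp [hx])
        refine (List.Perm.trans ?_ this)
        rw [List.filter_congr]
        intro p _
        show decide (a ≤ p.1 ∧ p.1 < b) = (decide (p.1 = a) || decide (a + 1 ≤ p.1 ∧ p.1 < b))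
        rw [← Bool.decide_or, decide_eq_decide]
        omega
      have hrec := ih ((b - (a + 1)).toNat) (by omega) (a + 1) b rfl
      refine List.Perm.trans ?_ hsplit.symm
      rw [pvFilterKey answers h a]
      cases hf : answers.find? (fun p => p.1 == a) with
      | none => simpa [hf] using hrec
      | some p => simpa [hf] using hrec.cons p
    · have hr : PySem.List.pyRange a b = [] := by
        rw [List.eq_nil_iff_forall_not_mem]
        intro x hx
        rw [PySem.List.mem_pyRange_one] at hx
        omega
      have hfil : answers.filter (fun p => decide (a ≤ p.1 ∧ p.1 < b)) = [] := by
        rw [List.filter_eq_nil_iff]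
        intro p _
        simp only [decide_eq_true_eq]
        omega
      rw [hr, hfil]
      simp

theorem pvPyRangePairwise : ∀ (n : Nat) (a b : Int), (b - a).toNat = n →
    (PySem.List.pyRange a b).Pairwise (· < ·) := by
  intro n
  induction n using Nat.strong_induction_on with
  | _ n ih =>
    intro a b hn
    by_cases hab : a < b
    · rw [PySem.List.pyRange_one_cons hab]
      refine List.Pairwise.cons ?_ (ih ((b - (a + 1)).toNat) (by omega) (a + 1) b rfl)
      intro x hx
      rw [PySem.List.mem_pyRange_one] at hx
      omega
    · have hr : PySem.List.pyRange a b = [] := by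
        rw [List.eq_nil_iff_forall_not_mem]
        intro x hx
        rw [PySem.List.mem_pyRange_one] at hx
        omega
      simp [hr]

-- A's picked entries are strictly increasing in key
theorem pvPairwiseA (answers : List (Int × String × String)) (a b : Int) :
    (((PySem.List.pyRange a b).filterMap (fun i => answers.find? (fun p => p.1 == i)))).Pairwise
      (fun x y => x.1 < y.1) := by
  refine List.Pairwise.filterMap _ ?_ (pvPyRangePairwise ((b - a).toNat) a b rfl)
  intro i j hij x hx y hy
  have hxi : x.1 = i := by
    have := List.find?_some (Option.mem_def.mp hx)
    simpa using this
  have hyj : y.1 = j := by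
    have := List.find?_some (Option.mem_def.mp hy)
    simpa using this
  omega

-- B's kept entries are strictly increasing in key
theorem pvPairwiseB (answers : List (Int × String × String)) (num_questions : Int)
    (h : (answers.map Prod.fst).Nodup) :
    (((PySem.List.sorted answers (fun kv => kv.1)).filter
        (fun kv => decide (1 ≤ kv.1 ∧ kv.1 ≤ num_questions)))).Pairwise
      (fun x y => x.1 < y.1) := by
  have hle : (((PySem.List.sorted answers (fun kv => kv.1)).filter
      (fun kv => decide (1 ≤ kv.1 ∧ kv.1 ≤ num_questions)))).Pairwise
      (fun x y => x.1 ≤ y.1) :=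
    (PySem.List.sorted_pairwise answers (fun kv => kv.1)).filter _
  have hnd : ((((PySem.List.sorted answers (fun kv => kv.1)).filter
      (fun kv => decide (1 ≤ kv.1 ∧ kv.1 ≤ num_questions)))).map Prod.fst).Nodup := by
    have hs : ((PySem.List.sorted answers (fun kv => kv.1)).map Prod.fst).Nodup :=
      (((PySem.List.sorted_perm answers (fun kv => kv.1) false).map Prod.fst).nodup_iff).mpr h
    exact List.Nodup.sublist (List.Sublist.map _ List.filter_sublist) hs
  have hne := (List.pairwise_map).mp hnd
  exact (hle.and hne).imp (fun hab => lt_of_le_of_ne hab.1 hab.2)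

-- the two selections coincide
theorem pvListsEq (answers : List (Int × String × String)) (num_questions : Int)
    (h : (answers.map Prod.fst).Nodup) :
    ((PySem.List.pyRange 1 (num_questions + 1)).filterMap
        (fun i => answers.find? (fun p => p.1 == i)))
      = ((PySem.List.sorted answers (fun kv => kv.1)).filter
        (fun kv => decide (1 ≤ kv.1 ∧ kv.1 ≤ num_questions))) := by
  have hpa := pvPermA answers h ((num_questions + 1 - 1).toNat) 1 (num_questions + 1) rfl
  have hpb : (((PySem.List.sorted answers (fun kv => kv.1)).filter
      (fun kv => decide (1 ≤ kv.1 ∧ kv.1 ≤ num_questions)))).Perm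
      (answers.filter (fun p => decide (1 ≤ p.1 ∧ p.1 < num_questions + 1))) := by
    have := (PySem.List.sorted_perm answers (fun kv => kv.1) false).filter
      (fun kv => decide (1 ≤ kv.1 ∧ kv.1 ≤ num_questions))
    refine this.trans ?_
    rw [List.filter_congr]
    intro p _
    rw [decide_eq_decide]
    omega
  have hperm := hpa.trans hpb.symm
  exact List.Perm.eq_of_pairwise
    (fun x y _ _ hxy hyx => absurd hyx (by omega))
    (pvPairwiseA answers 1 (num_questions + 1))
    (pvPairwiseB answers num_questions h) hperm

-- ===== VERDICT (by name: the statement is the Claim_ definition above) =====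
theorem create_answer_key_spec : Claim_equal_create_answer_key := by
  intro answers num_questions _ hpre
  show create_answer_key answers num_questions = create_answer_key_alt answers num_questions
  have hA : create_answer_key answers num_questions
      = ((PySem.List.pyRange 1 (num_questions + 1)).foldl (fun acc i =>
          match answers.find? (fun p => p.1 == i) with
          | some (_, option, _) =>
              acc ++ "\\answer{" ++ (if option = "a" then "a" else if option = "b" then "b" else "c")
                  ++ "} % Question " ++ PySem.Int.toStr i ++ "\n"
          | none => acc) "\\answerkey\n") ++ "\\endanswerkey\n" := rfl
  have hB : create_answer_key_alt answers num_questions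
      = "\\answerkey\n" ++ ((PySem.List.sorted answers (fun kv => kv.1)).foldl (fun acc kv =>
          if 1 ≤ kv.1 ∧ kv.1 ≤ num_questions then
            acc ++ "\\answer{" ++ (if kv.2.1 = "a" ∨ kv.2.1 = "b" then kv.2.1 else "c")
                ++ "} % Question " ++ PySem.Int.toStr kv.1 ++ "\n"
          else acc) "") ++ "\\endanswerkey\n" := rfl
  rw [hA, hB, pvFoldA, pvFoldB, pvCatA_eq, pvListsEq answers num_questions hpre]
  simp [String.append_assoc]
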